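-- pv_equiv track=rewrite | github.com/wujiajunhahah/lelamp-dev | lelamp/expression_engine.py | _build_rainbow_pattern
-- ===== SOURCE A (Python) =====
-- def _build_rainbow_pattern(led_count: int) -> list[tuple[int, int, int]]:
--     palette = (
--         (255, 80, 80),
--         (255, 170, 70),
--         (255, 230, 90),
--         (70, 255, 120),
--         (70, 180, 255),
--         (170, 120, 255),
--     )
--     count = max(1, led_count)
--     return [palette[index % len(palette)] for index in range(count)]
-- ===== SOURCE B (Python) =====
-- def _build_rainbow_pattern(led_count: int) -> list[tuple[int, int, int]]:
--     palette = [
--         (255, 80, 80),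
--         (255, 170, 70),
--         (255, 230, 90),
--         (70, 255, 120),
--         (70, 180, 255),
--         (170, 120, 255),
--     ]
--     count = max(1, led_count)
--     reps = count // len(palette) + 1
--     return (palette * reps)[:count]
-- ===== Notes on version B (the rewrite author's own statement) =====
-- stated objective: idiomatic
-- what changed: B builds the cycling list by list repetition (palette * (count//6 + 1)) followed by a single slice [:count], instead of A's per-index comprehension computing index % len(palette) for every position.
import Mathlib
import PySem

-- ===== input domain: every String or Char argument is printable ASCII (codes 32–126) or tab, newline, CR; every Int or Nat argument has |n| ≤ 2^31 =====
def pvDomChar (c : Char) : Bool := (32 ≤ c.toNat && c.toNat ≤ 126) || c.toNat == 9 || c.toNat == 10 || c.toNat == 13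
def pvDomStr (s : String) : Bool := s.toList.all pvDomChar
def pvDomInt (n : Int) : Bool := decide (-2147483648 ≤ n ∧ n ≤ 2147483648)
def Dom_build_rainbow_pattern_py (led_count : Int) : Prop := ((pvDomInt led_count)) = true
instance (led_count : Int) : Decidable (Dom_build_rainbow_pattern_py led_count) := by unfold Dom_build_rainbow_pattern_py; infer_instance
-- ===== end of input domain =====

-- B builds the cycling list by repeating the palette count//6 + 1 times and slicing to count,
-- instead of A's per-index comprehension with index % len(palette). Objective: idiomatic.

-- ===== PORT A =====
def pvPalette : List (Int × Int × Int) :=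
  [(255, 80, 80), (255, 170, 70), (255, 230, 90), (70, 255, 120), (70, 180, 255), (170, 120, 255)]

def build_rainbow_pattern_py (led_count : Int) : List (Int × Int × Int) :=
  let count := max 1 led_count
  (PySem.List.pyRange 0 count 1).map
    (fun index => PySem.List.pyGetD pvPalette (PySem.Int.mod index 6) (0, 0, 0))
    -- index % 6 is always in range, so the default of pyGetD is never used

-- ===== PORT B =====
def build_rainbow_pattern_py_alt (led_count : Int) : List (Int × Int × Int) :=
  let count := max 1 led_count
  let reps := PySem.Int.floordiv count 6 + 1
  PySem.List.slice ((List.replicate reps.toNat pvPalette).flatten) none (some count)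

-- ===== PRECONDITION & SPEC =====
def Spec_build_rainbow_pattern_py (led_count : Int) (out : List (Int × Int × Int)) : Prop := out = build_rainbow_pattern_py_alt led_count
instance (led_count : Int) (out : List (Int × Int × Int)) : Decidable (Spec_build_rainbow_pattern_py led_count out) := by unfold Spec_build_rainbow_pattern_py; infer_instance

-- ===== CLAIM (what is proved, stated in full; the proofs are below) =====
def Claim_equal_build_rainbow_pattern_py : Prop := ∀ (led_count : Int), Dom_build_rainbow_pattern_py led_count → Spec_build_rainbow_pattern_py led_count (build_rainbow_pattern_py led_count)

-- ===== LEMMAS AND PROOFS =====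

theorem pv_flatten_replicate_length {α : Type} (l : List α) (k : Nat) :
    (List.replicate k l).flatten.length = k * l.length := by
  induction k with
  | zero => simp
  | succ k ih => simp [List.replicate_succ, ih]; ring

theorem pv_getElem?_flatten_replicate {α : Type} (l : List α) (k i : Nat)
    (hl : 0 < l.length) (hi : i < k * l.length) :
    (List.replicate k l).flatten[i]? = some (l[i % l.length]'(Nat.mod_lt _ hl)) := by
  induction k generalizing i with
  | zero => omega
  | succ k ih =>
    rw [List.replicate_succ, List.flatten_cons]
    by_cases h : i < l.length
    · rw [List.getElem?_append_left h, List.getElem?_eq_getElem h]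
      congr 2
      exact (Nat.mod_eq_of_lt h).symm
    · rw [List.getElem?_append_right (by omega)]
      have hi' : i - l.length < k * l.length := by
        rw [Nat.succ_mul] at hi; omega
      rw [ih (i - l.length) hi']
      congr 2
      conv_rhs => rw [show i = l.length + (i - l.length) by omega]
      rw [Nat.add_mod_left]

theorem pv_core (n : Nat) :
    (List.range n).map (fun k => pvPalette.getD (k % 6) (0, 0, 0))
      = (List.replicate (n / 6 + 1) pvPalette).flatten.take n := by
  have hlen : pvPalette.length = 6 := by decide
  apply List.ext_getElem
  · rw [List.length_map, List.length_range, List.length_take,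
        pv_flatten_replicate_length, hlen]
    omega
  · intro i h1 h2
    have hi : i < n := by simpa using h1
    simp only [List.getElem_map, List.getElem_range, List.getElem_take]
    have h? := pv_getElem?_flatten_replicate pvPalette (n / 6 + 1) i
      (by omega) (by rw [hlen]; omega)
    rw [List.getElem?_eq_getElem (by rw [pv_flatten_replicate_length]; rw [hlen]; omega)] at h?
    have := Option.some.inj h?
    rw [this, List.getD_eq_getElem pvPalette _ (by omega)]
    congr 1

-- ===== VERDICT (by name: the statement is the Claim_ definition above) =====
theorem build_rainbow_pattern_py_spec : Claim_equal_build_rainbow_pattern_py := by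
  unfold Claim_equal_build_rainbow_pattern_py
  intro led_count _
  unfold Spec_build_rainbow_pattern_py build_rainbow_pattern_py build_rainbow_pattern_py_alt
  obtain ⟨n, hn⟩ : ∃ n : Nat, max 1 led_count = (n : Int) :=
    ⟨(max 1 led_count).toNat, by omega⟩
  have hn1 : 1 ≤ n := by omega
  simp only [hn]
  have hfd : PySem.Int.floordiv (n : Int) 6 = ((n / 6 : Nat) : Int) := by
    exact_mod_cast PySem.Int.floordiv_natCast n 6
  rw [PySem.List.pyRange_one, PySem.List.slice_to_natCast, hfd,
      show ((n / 6 : Nat) : Int) + 1 = ((n / 6 + 1 : Nat) : Int) by push_cast; ring,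
      Int.toNat_natCast]
  rw [← pv_core n]
  simp only [Int.sub_zero, Int.toNat_natCast, zero_add, List.map_map]
  apply List.map_congr_left
  intro k hk
  simp only [Function.comp]
  have hm : PySem.Int.mod (k : Int) 6 = ((k % 6 : Nat) : Int) := by
    exact_mod_cast PySem.Int.mod_natCast k 6
  rw [hm, PySem.List.pyGetD_natCast]
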